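-- pv_equiv track=rewrite | github.com/Dawson-Robotics/Kryptik-2024-Programming-Solutions | 2D1/twoD1.py | solve
-- ===== SOURCE A (Python) =====
-- def solve(n):
--     square=[]
--     add=3
--     for i in range(n):
--         if(i == 0):
--             square.append(chr(9484) + chr(9472) + chr(9488))
--             square.append(chr(9474) + " " + chr(9474))
--             square.append(chr(9492) + chr(9472) + chr(9496))
--         else:
--             square = [chr(9474) + x + chr(9474) for x in square]
--             square.insert(0, chr(9484) + (chr(9472)*add) + chr(9488))
--             square.insert(len(square), chr(9492) + (chr(9472)*add) + chr(9496))
--             add= add+2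
--     return square
-- ===== SOURCE B (Python) =====
-- def solve(n):
--     if n <= 0:
--         return []
--     m = 2 * n + 1
--     V, H = chr(9474), chr(9472)
--     rows = []
--     for i in range(m):
--         if i < n:
--             rows.append(V * i + chr(9484) + H * (m - 2 * i - 2) + chr(9488) + V * i)
--         elif i == n:
--             rows.append(V * n + " " + V * n)
--         else:
--             j = m - 1 - i
--             rows.append(V * j + chr(9492) + H * (m - 2 * j - 2) + chr(9496) + V * j)
--     return rows
-- ===== Notes on version B (the rewrite author's own statement) =====
-- stated objective: faster
-- what changed: B computes each output row directly from its row index (bars, corner, dashes, corner, bars) in a single pass over the rows, instead of A's loop that re-wraps every previously built row on each iteration.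
import Mathlib
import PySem

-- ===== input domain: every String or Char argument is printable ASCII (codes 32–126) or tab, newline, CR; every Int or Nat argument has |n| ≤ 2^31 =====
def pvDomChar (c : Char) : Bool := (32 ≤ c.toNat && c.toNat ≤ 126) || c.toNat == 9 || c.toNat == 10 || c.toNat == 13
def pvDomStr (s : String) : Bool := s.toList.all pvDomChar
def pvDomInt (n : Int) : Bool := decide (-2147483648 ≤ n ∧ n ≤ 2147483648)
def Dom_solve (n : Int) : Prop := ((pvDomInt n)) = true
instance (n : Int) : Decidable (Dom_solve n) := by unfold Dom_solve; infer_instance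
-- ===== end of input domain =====

-- B builds each of the 2n+1 rows of the nested square directly from its row index in one pass,
-- instead of A's loop that rewraps the whole accumulated square on every iteration.
-- Rows are built as List Char (Python string concatenation = list append), String.mk per row.

-- ===== PORT A =====
-- A's loop body: at i=0 append the three seed rows; else wrap every row in '│…│'
-- and insert a top and a bottom border of interior width add; add grows by 2.
def pvStepA (st : List (List Char) × Int) (i : Int) : List (List Char) × Int :=
  if i = 0 then
    (st.1 ++ [['┌', '─', '┐'], ['│', ' ', '│'], ['└', '─', '┘']], st.2)
  else
    (('┌' :: List.replicate st.2.toNat '─' ++ ['┐']) ::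
       st.1.map (fun x => '│' :: x ++ ['│']) ++
       [('└' :: List.replicate st.2.toNat '─' ++ ['┘'])],
     st.2 + 2)

def solve (n : Int) : List String :=
  (((PySem.List.pyRange 0 n 1).foldl pvStepA ([], 3)).1).map (fun cs => String.mk cs)

-- ===== PORT B =====
-- row i of the final picture, built directly: top borders for i < n, the middle row at i = n,
-- bottom borders (with m-1-i bars, j in Source B) below.
def pvRowB (n i : Int) : List Char :=
  if i < n then
    List.replicate i.toNat '│' ++
      '┌' :: List.replicate (2*n+1 - 2*i - 2).toNat '─' ++
      '┐' :: List.replicate i.toNat '│'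
  else if i = n then
    List.replicate n.toNat '│' ++ ' ' :: List.replicate n.toNat '│'
  else
    List.replicate (2*n+1 - 1 - i).toNat '│' ++
      '└' :: List.replicate (2*n+1 - 2*(2*n+1 - 1 - i) - 2).toNat '─' ++
      '┘' :: List.replicate (2*n+1 - 1 - i).toNat '│'

def solve_alt (n : Int) : List String :=
  if n ≤ 0 then []
  else ((PySem.List.pyRange 0 (2*n+1) 1).map (pvRowB n)).map (fun cs => String.mk cs)

-- ===== PRECONDITION & SPEC =====
def Spec_solve (n : Int) (out : List String) : Prop := out = solve_alt n
instance (n : Int) (out : List String) : Decidable (Spec_solve n out) := by unfold Spec_solve; infer_instance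

-- ===== CLAIM (what is proved, stated in full; the proofs are below) =====
def Claim_equal_solve : Prop := ∀ (n : Int), Dom_solve n → Spec_solve n (solve n)

-- ===== LEMMAS AND PROOFS =====

-- A's loop state after k iterations
def pvS (k : Nat) : List (List Char) × Int :=
  (PySem.List.pyRange 0 (k : Int) 1).foldl pvStepA ([], 3)

-- B's rows for parameter k, over the Int range / over a Nat range
def pvRows (k : Nat) : List (List Char) :=
  (PySem.List.pyRange 0 (2*(k : Int)+1) 1).map (pvRowB (k : Int))

def pvRowsN (k : Nat) : List (List Char) :=
  (List.range (2*k+1)).map (fun j : Nat => pvRowB (k : Int) (j : Int))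

lemma pvRows_eq (k : Nat) : pvRows k = pvRowsN k := by
  unfold pvRows pvRowsN
  rw [PySem.List.pyRange_one, show ((2*(k:Int)+1 - 0).toNat) = 2*k+1 from by omega]
  simp [Function.comp_def]

-- wrapping a row of shape  bars ++ a :: dashes ++ b :: bars  in '│…│' adds one bar each side
lemma pv_wrap (j c : Nat) (a b : Char) :
    List.replicate (j+1) '│' ++ a :: List.replicate c '─' ++ b :: List.replicate (j+1) '│'
      = '│' :: (List.replicate j '│' ++ a :: List.replicate c '─' ++ b :: List.replicate j '│') ++ ['│'] := by
  have hstep : List.replicate j '│' ++ ['│'] = List.replicate (j+1) '│' :=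
    List.replicate_succ'.symm
  simp only [List.cons_append, List.append_assoc]
  rw [hstep]
  simp [List.replicate_succ, List.cons_append]

lemma pv_wrap_mid (j : Nat) :
    List.replicate (j+1) '│' ++ ' ' :: List.replicate (j+1) '│'
      = '│' :: (List.replicate j '│' ++ ' ' :: List.replicate j '│') ++ ['│'] := by
  have hstep : List.replicate j '│' ++ ['│'] = List.replicate (j+1) '│' :=
    List.replicate_succ'.symm
  simp only [List.cons_append, List.append_assoc]
  rw [hstep]
  simp [List.replicate_succ, List.cons_append]

lemma pvRowB_top (k : Nat) :
    pvRowB (((k+1 : Nat)) : Int) (((0 : Nat)) : Int)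
      = '┌' :: List.replicate (2*k+1) '─' ++ ['┐'] := by
  unfold pvRowB
  rw [if_pos (by omega : (((0:Nat)):Int) < ((k+1:Nat):Int))]
  rw [show ((2*(((k+1:Nat)):Int)+1 - 2*(((0:Nat)):Int) - 2).toNat) = 2*k+1 from by omega]
  rw [show ((((0:Nat)):Int)).toNat = 0 from by omega]
  simp

lemma pvRowB_bot (k : Nat) :
    pvRowB (((k+1 : Nat)) : Int) (((2*k+1+1 : Nat)) : Int)
      = '└' :: List.replicate (2*k+1) '─' ++ ['┘'] := by
  unfold pvRowB
  rw [if_neg (by omega : ¬ (((2*k+1+1:Nat)):Int) < ((k+1:Nat):Int)),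
      if_neg (by omega : ¬ (((2*k+1+1:Nat)):Int) = ((k+1:Nat):Int))]
  rw [show ((2*(((k+1:Nat)):Int)+1 - 2*(2*(((k+1:Nat)):Int)+1 - 1 - (((2*k+1+1:Nat)):Int)) - 2).toNat) = 2*k+1 from by omega]
  rw [show ((2*(((k+1:Nat)):Int)+1 - 1 - (((2*k+1+1:Nat)):Int)).toNat) = 0 from by omega]
  simp

-- wrapping row j of picture k gives row j+1 of picture k+1
lemma pvRow_wrap (k j : Nat) (hj : j < 2*k+1) :
    pvRowB (((k+1 : Nat)) : Int) (((j+1 : Nat)) : Int)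
      = '│' :: pvRowB ((k : Nat) : Int) ((j : Nat) : Int) ++ ['│'] := by
  unfold pvRowB
  rcases lt_trichotomy j k with h | h | h
  · rw [if_pos (by omega : (((j+1:Nat)):Int) < ((k+1:Nat):Int)),
        if_pos (by omega : ((j:Nat):Int) < ((k:Nat):Int))]
    rw [show ((((j+1:Nat)):Int)).toNat = j+1 from by omega,
        show (((j:Nat):Int)).toNat = j from by omega,
        show ((2*(((k+1:Nat)):Int)+1 - 2*(((j+1:Nat)):Int) - 2).toNat)
           = (2*((k:Nat):Int)+1 - 2*((j:Nat):Int) - 2).toNat from by omega]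
    exact pv_wrap j _ '┌' '┐'
  · subst h
    rw [if_neg (by omega : ¬ (((j+1:Nat)):Int) < ((j+1:Nat):Int)), if_pos rfl,
        if_neg (by omega : ¬ ((j:Nat):Int) < ((j:Nat):Int)), if_pos rfl]
    rw [show ((((j+1:Nat)):Int)).toNat = j+1 from by omega,
        show (((j:Nat):Int)).toNat = j from by omega]
    exact pv_wrap_mid j
  · rw [if_neg (by omega : ¬ (((j+1:Nat)):Int) < ((k+1:Nat):Int)),
        if_neg (by omega : ¬ (((j+1:Nat)):Int) = ((k+1:Nat):Int)),
        if_neg (by omega : ¬ ((j:Nat):Int) < ((k:Nat):Int)),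
        if_neg (by omega : ¬ ((j:Nat):Int) = ((k:Nat):Int))]
    rw [show ((2*(((k+1:Nat)):Int)+1 - 1 - (((j+1:Nat)):Int)).toNat) = (2*k - j) + 1 from by omega,
        show ((2*((k:Nat):Int)+1 - 1 - ((j:Nat):Int)).toNat) = 2*k - j from by omega,
        show ((2*(((k+1:Nat)):Int)+1 - 2*(2*(((k+1:Nat)):Int)+1 - 1 - (((j+1:Nat)):Int)) - 2).toNat)
           = 2*j - 2*k - 1 from by omega,
        show ((2*((k:Nat):Int)+1 - 2*(2*((k:Nat):Int)+1 - 1 - ((j:Nat):Int)) - 2).toNat)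
           = 2*j - 2*k - 1 from by omega]
    exact pv_wrap (2*k - j) (2*j - 2*k - 1) '└' '┘'

lemma pvRowsN_succ (k : Nat) :
    pvRowsN (k+1) =
      ('┌' :: List.replicate (2*k+1) '─' ++ ['┐']) ::
        (pvRowsN k).map (fun x => '│' :: x ++ ['│']) ++
        [('└' :: List.replicate (2*k+1) '─' ++ ['┘'])] := by
  unfold pvRowsN
  rw [show 2*(k+1)+1 = (2*k+1+1)+1 from by omega, List.range_succ, List.range_succ_eq_map]
  simp only [List.map_append, List.map_cons, List.map_nil, List.map_map, List.cons_append]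
  congr 1
  · exact pvRowB_top k
  congr 1
  · refine List.map_congr_left ?_
    intro j hjm
    have hj : j < 2*k+1 := List.mem_range.mp hjm
    show pvRowB (((k+1 : Nat)) : Int) (((j+1 : Nat)) : Int) = _
    exact pvRow_wrap k j hj
  · show [pvRowB (((k+1 : Nat)) : Int) (((2*k+1+1 : Nat)) : Int)] = _
    rw [pvRowB_bot k]
    simp

-- main invariant: A's state after k ≥ 1 iterations is (B's rows for k, 2k+1)
lemma pvS_eq (k : Nat) (hk : 1 ≤ k) : pvS k = (pvRows k, 2*(k:Int)+1) := by
  induction k, hk using Nat.le_induction with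
  | base => decide
  | succ k hk ih =>
    unfold pvS
    have hr : PySem.List.pyRange 0 ((k+1 : Nat) : Int) 1
            = PySem.List.pyRange 0 (k : Int) 1 ++ [(k : Int)] := by
      rw [show (((k+1:Nat)):Int) = (k:Int)+1 from by push_cast; ring,
          PySem.List.pyRange_one_succ_right (by exact_mod_cast Nat.zero_le k)]
    rw [hr, List.foldl_append]
    show pvStepA (pvS k) (k:Int) = _
    rw [ih]
    unfold pvStepA
    have hne : ((k:Int)) ≠ 0 := by
      have : (1:Int) ≤ (k:Int) := by exact_mod_cast hk
      omega
    rw [if_neg hne, Prod.mk.injEq]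
    refine ⟨?_, by push_cast; ring⟩
    rw [pvRows_eq, pvRows_eq, pvRowsN_succ,
        show ((2*(k:Int)+1).toNat) = 2*k+1 from by omega]

-- ===== VERDICT (by name: the statement is the Claim_ definition above) =====
theorem solve_spec : Claim_equal_solve := by
  intro n _
  unfold Spec_solve solve solve_alt
  by_cases hn : n ≤ 0
  · rw [PySem.List.pyRange_one_eq_nil hn, if_pos hn]
    rfl
  · rw [if_neg hn, show n = ((n.toNat : Nat) : Int) from by omega]
    have h1 : 1 ≤ n.toNat := by omega
    have hs := pvS_eq n.toNat h1
    unfold pvS at hs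
    rw [hs]
    rw [pvRows]
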